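-- pv_equiv track=rewrite | github.com/0520hy/Algorithm | 프로그래머스/2/138476. 귤 고르기/귤 고르기.py | solution
-- ===== SOURCE A (Python) =====
-- def solution(k, tangerine):
--     answer = 0
--     dic = {}
--     for i in tangerine:
--             if i in dic:
--                 dic[i] += 1
--             else:
--                 dic[i] = 1
--
--
--     sorted_dic = sorted(dic.items(), key = lambda x:x[1], reverse = True)
--
--
--     for _, val in sorted_dic:
--         if k <= 0:
--             break
--         k -= val
--         answer += 1
--
--
--
--     return answer
-- ===== SOURCE B (Python) =====
-- def solution(k, tangerine):
--     # Counting approach: frequency table, then a bucket count of the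
--     # frequencies, consumed from the largest possible frequency downward.
--     freq = {}
--     for t in tangerine:
--         freq[t] = freq.get(t, 0) + 1
--     bucket = {}
--     for c in freq.values():
--         bucket[c] = bucket.get(c, 0) + 1
--     answer = 0
--     remaining = k
--     for c in range(len(tangerine), 0, -1):
--         m = bucket.get(c, 0)
--         for _ in range(m):
--             if remaining > 0:
--                 remaining -= c
--                 answer += 1
--     return answer
-- ===== Notes on version B (the rewrite author's own statement) =====
-- stated objective: alternative
-- what changed: Replaces sorting the frequency table by value with a bucket count of the frequencies, consumed greedily from the largest possible frequency downward (no sort).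
import Mathlib
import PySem

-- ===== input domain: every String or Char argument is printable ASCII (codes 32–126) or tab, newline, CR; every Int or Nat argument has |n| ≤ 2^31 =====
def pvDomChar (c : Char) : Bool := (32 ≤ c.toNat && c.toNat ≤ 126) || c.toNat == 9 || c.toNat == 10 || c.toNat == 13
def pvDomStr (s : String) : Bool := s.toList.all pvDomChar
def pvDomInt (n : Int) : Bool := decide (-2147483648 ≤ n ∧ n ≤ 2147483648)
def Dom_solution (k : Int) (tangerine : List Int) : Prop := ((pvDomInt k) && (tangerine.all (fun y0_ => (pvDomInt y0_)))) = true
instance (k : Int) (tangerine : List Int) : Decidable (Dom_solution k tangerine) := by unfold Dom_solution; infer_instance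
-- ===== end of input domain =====

-- B replaces A's comparison sort of the frequency table by a bucket count of the
-- frequencies consumed from the largest possible frequency downward (alternative algorithm).

-- ===== PORT A =====
-- the final 'for _, val in sorted_dic: if k <= 0: break; k -= val; answer += 1' loop
def solutionLoopA : List (Int × Int) → Int → Int → Int
  | [], _, answer => answer
  | (_, v) :: rest, k, answer =>
      if k ≤ 0 then answer else solutionLoopA rest (k - v) (answer + 1)

def solution (k : Int) (tangerine : List Int) : Int :=
  let dic := tangerine.foldl
    (fun d i => if d.contains i then d.modify i 0 (· + 1) else d.insert i 1)
    (PySem.Dict.empty : PySem.Dict Int Int)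
  let sorted_dic := PySem.List.sorted dic.items (fun x => x.2) true
  solutionLoopA sorted_dic k 0

-- ===== PORT B =====
def solution_alt (k : Int) (tangerine : List Int) : Int :=
  let freq := tangerine.foldl (fun d t => d.insert t (d.getD t 0 + 1))
    (PySem.Dict.empty : PySem.Dict Int Int)
  let bucket := freq.values.foldl (fun d c => d.insert c (d.getD c 0 + 1))
    (PySem.Dict.empty : PySem.Dict Int Int)
  let st := (PySem.List.pyRange (tangerine.length : Int) 0 (-1)).foldl
    (fun st c =>
      (PySem.List.pyRange 0 (bucket.getD c 0) 1).foldl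
        (fun st _ => if 0 < st.2 then (st.1 + 1, st.2 - c) else st) st)
    ((0 : Int), k)
  st.1

-- ===== PRECONDITION & SPEC =====
def Spec_solution (k : Int) (tangerine : List Int) (out : Int) : Prop := out = solution_alt k tangerine
instance (k : Int) (tangerine : List Int) (out : Int) : Decidable (Spec_solution k tangerine out) := by unfold Spec_solution; infer_instance

-- ===== CLAIM (what is proved, stated in full; the proofs are below) =====
def Claim_equal_solution : Prop := ∀ (k : Int) (tangerine : List Int), Dom_solution k tangerine → Spec_solution k tangerine (solution k tangerine)

-- ===== LEMMAS AND PROOFS =====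
-- the shared greedy step: take one group of size v while the remaining demand is positive
def gstep (st : Int × Int) (v : Int) : Int × Int :=
  if 0 < st.2 then (st.1 + 1, st.2 - v) else st

theorem foldl_gstep_frozen (l : List Int) (st : Int × Int) (h : st.2 ≤ 0) :
    l.foldl gstep st = st := by
  induction l with
  | nil => rfl
  | cons v rest ih => simp only [List.foldl_cons, gstep, if_neg (by omega : ¬ 0 < st.2)]; exact ih

theorem loopA_eq (l : List (Int × Int)) (k a : Int) :
    solutionLoopA l k a = ((l.map (·.2)).foldl gstep (a, k)).1 := by
  induction l generalizing k a with
  | nil => rfl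
  | cons p rest ih =>
    obtain ⟨i, v⟩ := p
    by_cases h : k ≤ 0
    · simp only [solutionLoopA, if_pos h, List.map_cons, List.foldl_cons]
      rw [show gstep (a, k) v = (a, k) by simp [gstep]; omega]
      rw [foldl_gstep_frozen _ _ (by simpa using h)]
    · simp only [solutionLoopA, if_neg h, List.map_cons, List.foldl_cons]
      rw [show gstep (a, k) v = (a + 1, k - v) by simp [gstep]; omega]
      exact ih (k - v) (a + 1)

theorem inner_eq (c : Int) (l : List Int) (st : Int × Int) :
    l.foldl (fun st _ => if 0 < st.2 then (st.1 + 1, st.2 - c) else st) st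
      = (List.replicate l.length c).foldl gstep st := by
  induction l generalizing st with
  | nil => rfl
  | cons x rest ih => simp only [List.foldl_cons, List.length_cons, List.replicate_succ]; exact ih _

theorem outer_eq (m : Int → Nat) (cs : List Int) (st : Int × Int) :
    cs.foldl (fun st c => (List.replicate (m c) c).foldl gstep st) st
      = (cs.flatMap (fun c => List.replicate (m c) c)).foldl gstep st := by
  induction cs generalizing st with
  | nil => rfl
  | cons c rest ih => simp only [List.foldl_cons, List.flatMap_cons, List.foldl_append]; exact ih _

theorem flatMap_replicate_count_perm (cs : List Int) (vals : List Int)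
    (hnd : cs.Nodup) (hmem : ∀ v ∈ vals, v ∈ cs) :
    (cs.flatMap (fun c => List.replicate (vals.count c) c)).Perm vals := by
  induction cs generalizing vals with
  | nil =>
    have : vals = [] := by
      cases vals with
      | nil => rfl
      | cons v r => exact absurd (hmem v (by simp)) (by simp)
    simp [this]
  | cons c rest ih =>
    rcases List.nodup_cons.mp hnd with ⟨hc, hrest⟩
    have hcongr : rest.flatMap (fun d => List.replicate (vals.count d) d)
        = rest.flatMap (fun d => List.replicate ((vals.filter (fun v => !(v == c))).count d) d) := by
      apply List.flatMap_congr
      intro d hd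
      have hdc : (!(d == c)) = true := by
        simp only [Bool.not_eq_eq_eq_not, Bool.not_true, beq_eq_false_iff_ne]
        exact fun h => hc (h ▸ hd)
      rw [List.count_filter (p := fun v => !(v == c)) hdc]
    have hperm : (rest.flatMap (fun d => List.replicate ((vals.filter (fun v => !(v == c))).count d) d)).Perm
        (vals.filter (fun v => !(v == c))) := by
      apply ih _ hrest
      intro v hv
      rcases List.mem_filter.mp hv with ⟨hv1, hv2⟩
      have := hmem v hv1
      simp only [List.mem_cons] at this
      rcases this with h | h
      · subst h; simp at hv2
      · exact h
    have h1 : (c :: rest).flatMap (fun d => List.replicate (vals.count d) d)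
        = vals.filter (· == c) ++ rest.flatMap (fun d => List.replicate ((vals.filter (fun v => !(v == c))).count d) d) := by
      rw [List.flatMap_cons, ← hcongr, List.filter_beq]
    rw [h1]
    exact (hperm.append_left _).trans (List.filter_append_perm _ vals)

theorem flatMap_replicate_sorted (cs : List Int) (m : Int → Nat) (h : cs.Pairwise (· > ·)) :
    (cs.flatMap (fun c => List.replicate (m c) c)).Pairwise (fun a b : Int => b ≤ a) := by
  induction cs with
  | nil => simp
  | cons c rest ih =>
    rcases List.pairwise_cons.mp h with ⟨hhead, htail⟩
    rw [List.flatMap_cons]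
    apply List.pairwise_append.mpr
    refine ⟨List.pairwise_replicate.mpr (Or.inr le_rfl), ih htail, ?_⟩
    intro a ha b hb
    rcases List.mem_flatMap.mp hb with ⟨d, hd, hbd⟩
    rw [List.eq_of_mem_replicate ha, List.eq_of_mem_replicate hbd]
    exact le_of_lt (hhead d hd)

theorem key_list_eq (t : List Int) :
    (PySem.List.pyRange (t.length : Int) 0 (-1)).flatMap
        (fun c => List.replicate (((PySem.Dict.counter t : PySem.Dict Int Int).values).count c) c)
      = (PySem.List.sorted ((PySem.Dict.counter t : PySem.Dict Int Int).items) (fun x => x.2) true).map (·.2) := by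
  have hvals : (PySem.Dict.counter t : PySem.Dict Int Int).values
      = (PySem.Set.ofList t).map (fun key => ((t.count key : Int))) := by
    show ((PySem.Dict.counter t : PySem.Dict Int Int).items).map (·.2) = _
    rw [PySem.Dict.items_counter]
    simp [List.map_map, Function.comp]
  have hnd : (PySem.List.pyRange (t.length : Int) 0 (-1)).Nodup := by
    rw [PySem.List.pyRange_neg_one_eq_reverse]
    exact List.nodup_reverse.mpr (PySem.List.nodup_pyRange_one _ _)
  have hmem : ∀ v ∈ (PySem.Dict.counter t : PySem.Dict Int Int).values,
      v ∈ PySem.List.pyRange (t.length : Int) 0 (-1) := by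
    intro v hv
    rw [hvals] at hv
    rcases List.mem_map.mp hv with ⟨key, hkey, rfl⟩
    have hkt : key ∈ t := (PySem.Set.mem_ofList t key).mp hkey
    have h1 : 0 < t.count key := List.count_pos_iff.mpr hkt
    have h2 : t.count key ≤ t.length := List.count_le_length
    rw [PySem.List.mem_pyRange_neg_one]
    exact ⟨by exact_mod_cast h1, by exact_mod_cast h2⟩
  have hpw : (PySem.List.pyRange (t.length : Int) 0 (-1)).Pairwise (· > ·) := by
    rw [PySem.List.pyRange_neg_one_eq_reverse]
    exact List.pairwise_reverse.mpr (PySem.List.pairwise_lt_pyRange_one _ _)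
  have hdesc_sorted := flatMap_replicate_sorted (PySem.List.pyRange (t.length : Int) 0 (-1))
    (fun c => (PySem.Dict.counter t : PySem.Dict Int Int).values.count c) hpw
  have hdesc_perm := flatMap_replicate_count_perm (PySem.List.pyRange (t.length : Int) 0 (-1))
    ((PySem.Dict.counter t : PySem.Dict Int Int).values) hnd hmem
  have hs_pair : ((PySem.List.sorted ((PySem.Dict.counter t : PySem.Dict Int Int).items) (fun x => x.2) true).map (·.2)).Pairwise
      (fun a b : Int => b ≤ a) :=
    List.Pairwise.map _ (fun _ _ h => h) (PySem.List.sorted_pairwise_rev _ _)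
  have hs_perm : ((PySem.List.sorted ((PySem.Dict.counter t : PySem.Dict Int Int).items) (fun x => x.2) true).map (·.2)).Perm
      ((PySem.Dict.counter t : PySem.Dict Int Int).values) :=
    (PySem.List.sorted_perm _ _ true).map _
  exact List.Perm.eq_of_pairwise (fun _ _ _ _ hab hba => le_antisymm hba hab)
    hdesc_sorted hs_pair (hdesc_perm.trans hs_perm.symm)


-- ===== VERDICT (by name: the statement is the Claim_ definition above) =====
theorem solution_spec : Claim_equal_solution := by
  intro k t _
  show solution k t = solution_alt k t
  simp only [solution, solution_alt]
  have hdic : t.foldl (fun d i => if d.contains i then d.modify i 0 (· + 1) else d.insert i 1)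
      (PySem.Dict.empty : PySem.Dict Int Int) = PySem.Dict.counter t := by
    rw [PySem.Dict.counter_eq_foldl]
    apply PySem.List.foldl_congr_mem
    intro d i _
    by_cases h : d.contains i = true
    · simp [h]
    · rw [if_neg (by simp [h])]
      simp [Bool.not_eq_true] at h
      simp [PySem.Dict.modify, PySem.Dict.getD_of_not_contains, h]
  rw [hdic, PySem.Dict.foldl_insert_getD_add_one_eq_counter t,
      PySem.Dict.foldl_insert_getD_add_one_eq_counter ((PySem.Dict.counter t : PySem.Dict Int Int).values)]
  simp only [PySem.Dict.getD_counter]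
  rw [loopA_eq]
  have hbody : ∀ (st : Int × Int), ∀ c ∈ PySem.List.pyRange (t.length : Int) 0 (-1),
      (PySem.List.pyRange 0 (((PySem.Dict.counter t : PySem.Dict Int Int).values.count c : Int)) 1).foldl
        (fun st _ => if 0 < st.2 then (st.1 + 1, st.2 - c) else st) st
      = (List.replicate ((PySem.Dict.counter t : PySem.Dict Int Int).values.count c) c).foldl gstep st := by
    intro st c _
    rw [inner_eq]
    congr 1
    simp [PySem.List.length_pyRange_one]
  rw [PySem.List.foldl_congr_mem _ _ _ _ hbody, outer_eq, key_list_eq]
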